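-- pv_equiv track=rewrite | github.com/rodanmuro/contador-palabras-contexto | src/core/word_counter.py | get_word_boundaries
-- ===== SOURCE A (Python) =====
-- from typing import List
--
-- def get_word_boundaries(text: str) -> List[tuple]:
--     """
--     Obtiene las posiciones (inicio, fin) de cada palabra.
--
--     Args:
--         text: Texto a analizar.
--
--     Returns:
--         Lista de tuplas (inicio, fin) de cada palabra.
--     """
--     words = text.split()
--     boundaries = []
--     current_pos = 0
--
--     for word in words:
--         start = text.find(word, current_pos)
--         end = start + len(word)
--         boundaries.append((start, end))
--         current_pos = end
--
--     return boundaries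
-- ===== SOURCE B (Python) =====
-- def get_word_boundaries(text):
--     """Single left-to-right character scan: track the start of the current
--     non-space run; emit (start, end) when the run ends."""
--     boundaries = []
--     start = None
--     for i, ch in enumerate(text):
--         if ch.isspace():
--             if start is not None:
--                 boundaries.append((start, i))
--                 start = None
--         elif start is None:
--             start = i
--     if start is not None:
--         boundaries.append((start, len(text)))
--     return boundaries
-- ===== Notes on version B (the rewrite author's own statement) =====
-- stated objective: alternative
-- what changed: Replaced split()-then-find() re-scanning with a single character-by-character scan that tracks the start of the current non-whitespace run and emits each (start, end) as the run closes.
import Mathlib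
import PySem

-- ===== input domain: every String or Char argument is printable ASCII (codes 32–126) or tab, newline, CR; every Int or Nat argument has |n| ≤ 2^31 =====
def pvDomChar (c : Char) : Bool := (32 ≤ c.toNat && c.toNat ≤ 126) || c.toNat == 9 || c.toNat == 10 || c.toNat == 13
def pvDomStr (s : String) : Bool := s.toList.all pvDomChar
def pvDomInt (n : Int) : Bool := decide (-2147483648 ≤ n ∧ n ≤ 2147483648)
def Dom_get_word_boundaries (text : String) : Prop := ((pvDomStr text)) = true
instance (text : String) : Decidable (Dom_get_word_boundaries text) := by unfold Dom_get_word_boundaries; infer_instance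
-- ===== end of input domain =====

-- B replaces A's split()+find() re-scanning with one character scan tracking the current run's start; return values are proved equal on all of Dom.

-- ===== PORT A =====
-- words = text.split(); for word in words: start = text.find(word, current_pos); …
def get_word_boundaries (text : String) : List (Int × Int) :=
  let words := PySem.Str.split₀ text
  let r := words.foldl (fun (st : List (Int × Int) × Int) (word : String) =>
    let start := PySem.Str.findFrom text word st.2
    let end_ := start + PySem.Str.len word
    (st.1 ++ [(start, end_)], end_)) ([], 0)
  r.1

-- ===== PORT B =====
-- the 'for i, ch in enumerate(text)' loop of Source B as structural recursion over the same state (boundaries, start)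
def altGo : List Char → Nat → List (Int × Int) → Option Int → List (Int × Int) × Option Int
  | [], _, acc, st => (acc, st)
  | c :: rest, i, acc, st =>
    if PySem.Chars.isspace c then
      match st with
      | some s => altGo rest (i + 1) (acc ++ [(s, (i : Int))]) none
      | none => altGo rest (i + 1) acc none
    else
      match st with
      | none => altGo rest (i + 1) acc (some (i : Int))
      | some _ => altGo rest (i + 1) acc st

def get_word_boundaries_alt (text : String) : List (Int × Int) :=
  let r := altGo text.toList 0 [] none
  match r.2 with
  | some st => r.1 ++ [(st, PySem.Str.len text)]
  | none => r.1

-- ===== PRECONDITION & SPEC =====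
def Spec_get_word_boundaries (text : String) (out : List (Int × Int)) : Prop := out = get_word_boundaries_alt text
instance (text : String) (out : List (Int × Int)) : Decidable (Spec_get_word_boundaries text out) := by unfold Spec_get_word_boundaries; infer_instance

-- ===== CLAIM (what is proved, stated in full; the proofs are below) =====
def Claim_equal_get_word_boundaries : Prop := ∀ (text : String), Dom_get_word_boundaries text → Spec_get_word_boundaries text (get_word_boundaries text)

-- ===== LEMMAS AND PROOFS =====

-- the A-side fold step, over character lists
def stepC (s : List Char) (st : List (Int × Int) × Int) (w : List Char) : List (Int × Int) × Int :=
  let start := PySem.Chars.findFrom s w st.2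
  let end_ := start + (w.length : Int)
  (st.1 ++ [(start, end_)], end_)

-- reference function: boundaries of the suffix starting at absolute index i
mutual
def specB : List Char → Nat → List (Int × Int)
  | [], _ => []
  | c :: rest, i => if PySem.Chars.isspace c then specB rest (i + 1) else inWord rest (i + 1) (i : Int)
def inWord : List Char → Nat → Int → List (Int × Int)
  | [], i, st => [(st, (i : Int))]
  | c :: rest, i, st =>
    if PySem.Chars.isspace c then (st, (i : Int)) :: specB rest (i + 1) else inWord rest (i + 1) st
end

-- split₀.go: the accumulator distributes out
lemma go_acc (s : List Char) : ∀ (cur : List Char) (acc : List (List Char)),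
    PySem.Chars.split₀.go s cur acc = acc.reverse ++ PySem.Chars.split₀.go s cur [] := by
  induction s with
  | nil =>
    intro cur acc
    by_cases h : cur.isEmpty <;> simp [PySem.Chars.split₀.go, h]
  | cons c rest ih =>
    intro cur acc
    by_cases h : PySem.Chars.isspace c
    · by_cases hc : cur.isEmpty
      · have e1 : ∀ a, PySem.Chars.split₀.go (c :: rest) cur a = PySem.Chars.split₀.go rest [] a := by
          intro a; simp [PySem.Chars.split₀.go, h, hc]
        rw [e1, e1]; exact ih [] acc
      · have e1 : ∀ a, PySem.Chars.split₀.go (c :: rest) cur a = PySem.Chars.split₀.go rest [] (cur.reverse :: a) := by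
          intro a; simp [PySem.Chars.split₀.go, h, hc]
        rw [e1, e1, ih [] (cur.reverse :: acc), ih [] [cur.reverse]]
        simp
    · simp only [PySem.Chars.split₀.go, h]
      exact ih (c :: cur) acc

lemma split0_nil : PySem.Chars.split₀ [] = [] := rfl

lemma split0_space {c : Char} (s : List Char) (h : PySem.Chars.isspace c) :
    PySem.Chars.split₀ (c :: s) = PySem.Chars.split₀ s := by
  simp [PySem.Chars.split₀, PySem.Chars.split₀.go, h]

-- inside a word (cur ≠ []): the word closes at the next space
lemma go_word (s : List Char) : ∀ (cur : List Char), cur ≠ [] →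
    PySem.Chars.split₀.go s cur [] =
      (cur.reverse ++ s.takeWhile (fun c => !PySem.Chars.isspace c)) ::
        PySem.Chars.split₀ (s.dropWhile (fun c => !PySem.Chars.isspace c)) := by
  induction s with
  | nil =>
    intro cur hcur
    simp [PySem.Chars.split₀.go, List.isEmpty_iff, hcur, split0_nil]
  | cons c rest ih =>
    intro cur hcur
    by_cases h : PySem.Chars.isspace c
    · have e1 : PySem.Chars.split₀.go (c :: rest) cur [] = PySem.Chars.split₀.go rest [] [cur.reverse] := by
        simp [PySem.Chars.split₀.go, h, List.isEmpty_iff, hcur]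
      rw [e1, go_acc]
      have e2 : (List.takeWhile (fun c => !PySem.Chars.isspace c) (c :: rest)) = [] := by
        simp [List.takeWhile, h]
      have e3 : (List.dropWhile (fun c => !PySem.Chars.isspace c) (c :: rest)) = c :: rest := by
        simp [List.dropWhile, h]
      rw [e2, e3, split0_space rest h]
      simp [PySem.Chars.split₀]
    · have e1 : PySem.Chars.split₀.go (c :: rest) cur [] = PySem.Chars.split₀.go rest (c :: cur) [] := by
        simp [PySem.Chars.split₀.go, h]
      rw [e1, ih (c :: cur) (by simp)]
      simp [List.takeWhile, List.dropWhile, h]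

lemma split0_word {c : Char} (s : List Char) (h : ¬ PySem.Chars.isspace c) :
    PySem.Chars.split₀ (c :: s) =
      (c :: s.takeWhile (fun c => !PySem.Chars.isspace c)) ::
        PySem.Chars.split₀ (s.dropWhile (fun c => !PySem.Chars.isspace c)) := by
  have e1 : PySem.Chars.split₀ (c :: s) = PySem.Chars.split₀.go s [c] [] := by
    simp [PySem.Chars.split₀, PySem.Chars.split₀.go, h]
  rw [e1, go_word _ [c] (by simp)]
  simp

-- find points at j when w is a prefix at j and at no earlier index
lemma find_eq_of_prefix_min {s w : List Char} (j : Nat) (hpre : w <+: s.drop j)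
    (hmin : ∀ i, i < j → ¬ w <+: s.drop i) : PySem.Chars.find s w = (j : Int) := by
  have h0 : 0 ≤ PySem.Chars.find s w :=
    (PySem.Chars.find_nonneg_iff s w).mpr (hpre.isInfix.trans (List.drop_suffix j s).isInfix)
  obtain ⟨hpref, hm⟩ := PySem.Chars.find_spec h0
  rcases Nat.lt_trichotomy (PySem.Chars.find s w).toNat j with hlt | heq | hgt
  · exact absurd hpref (hmin _ hlt)
  · omega
  · exact absurd hpre (hm j hgt)

-- the character at p when the suffix from p is known
lemma getElem_of_drop_cons {s rest : List Char} {c : Char} {p : Nat}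
    (h : s.drop p = c :: rest) (hp : p < s.length) : s[p]'hp = c := by
  have h0 : (s.drop p)[0]'(by simp [h]) = c := by simp [h]
  rwa [List.getElem_drop] at h0

-- inWord marches to the end of the current word
lemma inWord_eq (rest : List Char) : ∀ (i : Nat) (st : Int),
    inWord rest i st =
      (st, ((i + (rest.takeWhile (fun c => !PySem.Chars.isspace c)).length : Nat) : Int)) ::
        specB (rest.dropWhile (fun c => !PySem.Chars.isspace c))
          (i + (rest.takeWhile (fun c => !PySem.Chars.isspace c)).length) := by
  induction rest with
  | nil => intro i st; simp [inWord, specB]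
  | cons c rest ih =>
    intro i st
    by_cases h : PySem.Chars.isspace c
    · simp [inWord, specB, List.takeWhile, List.dropWhile, h]
    · have ht : List.takeWhile (fun c => !PySem.Chars.isspace c) (c :: rest)
          = c :: List.takeWhile (fun c => !PySem.Chars.isspace c) rest := by
        simp [List.takeWhile, h]
      have hd : List.dropWhile (fun c => !PySem.Chars.isspace c) (c :: rest)
          = List.dropWhile (fun c => !PySem.Chars.isspace c) rest := by
        simp [List.dropWhile, h]
      rw [ht, hd]
      have e1 : inWord (c :: rest) i st = inWord rest (i + 1) st := by simp [inWord, h]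
      rw [e1, ih (i + 1) st]
      have e2 : i + 1 + (List.takeWhile (fun c => !PySem.Chars.isspace c) rest).length
          = i + (c :: List.takeWhile (fun c => !PySem.Chars.isspace c) rest).length := by
        simp; omega
      rw [e2]

-- A's fold over the words of s.drop p, with current_pos q ≤ p and only spaces between q and p,
-- computes specB (s.drop p) p
lemma foldA (s : List Char) : ∀ (n p q : Nat), q ≤ p → p ≤ s.length → s.length - p ≤ n →
    (∀ k, q ≤ k → k < p → ∀ hk : k < s.length, PySem.Chars.isspace (s[k]'hk)) →
    ∀ acc : List (Int × Int),
      (List.foldl (stepC s) (acc, (q : Int)) (PySem.Chars.split₀ (s.drop p))).1 =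
        acc ++ specB (s.drop p) p := by
  intro n
  induction n with
  | zero =>
    intro p q hqp hp hn hsps acc
    have hd : s.drop p = [] := by apply List.drop_eq_nil_of_le; omega
    rw [hd, split0_nil]
    simp [specB]
  | succ n ih =>
    intro p q hqp hp hn hsps acc
    cases hdrop : s.drop p with
    | nil =>
      rw [split0_nil]; simp [specB]
    | cons c rest =>
      have hlen : s.length = p + 1 + rest.length := by
        have := congrArg List.length hdrop
        simp [List.length_drop] at this
        omega
      have hcp : s[p]'(by omega) = c := getElem_of_drop_cons hdrop (by omega)
      by_cases hsp : PySem.Chars.isspace c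
      · rw [split0_space rest hsp]
        have h2 : s.drop (p + 1) = rest := by
          rw [← List.drop_drop (i := 1) (j := p), hdrop]; rfl
        have hsps' : ∀ k, q ≤ k → k < p + 1 → ∀ hk : k < s.length, PySem.Chars.isspace (s[k]'hk) := by
          intro k hqk hkp hk
          by_cases hke : k = p
          · subst hke; rw [hcp]; exact hsp
          · exact hsps k hqk (by omega) hk
        have := ih (p + 1) q (by omega) (by omega) (by omega) hsps' acc
        rw [h2] at this
        rw [this]
        show _ = acc ++ (if PySem.Chars.isspace c then specB rest (p + 1) else _)
        rw [if_pos hsp]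
      · rw [split0_word rest hsp]
        have htw : List.takeWhile (fun c => !PySem.Chars.isspace c) rest ++
            List.dropWhile (fun c => !PySem.Chars.isspace c) rest = rest :=
          List.takeWhile_append_dropWhile
        set tw := List.takeWhile (fun c => !PySem.Chars.isspace c) rest with htwdef
        set r := List.dropWhile (fun c => !PySem.Chars.isspace c) rest with hrdef
        -- the find from q lands exactly on p
        have hfind : PySem.Chars.find (s.drop q) (c :: tw) = ((p - q : Nat) : Int) := by
          apply find_eq_of_prefix_min
          · rw [List.drop_drop, show q + (p - q) = p by omega, hdrop]
            exact (List.cons_prefix_cons).mpr ⟨rfl, List.takeWhile_prefix _⟩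
          · intro i hi hpref
            rw [List.drop_drop] at hpref
            obtain ⟨tl, htl⟩ := hpref
            have hqi : q + i < s.length := by omega
            have : s[q + i]'hqi = c := getElem_of_drop_cons htl.symm hqi
            have := hsps (q + i) (by omega) (by omega) hqi
            rw [‹s[q + i]'hqi = c›] at this
            exact hsp this
        have hff : PySem.Chars.findFrom s (c :: tw) (q : Int) = (p : Int) := by
          rw [PySem.Chars.findFrom_natCast s (c :: tw) q (by omega), hfind]
          have : ((p - q : Nat) : Int) ≠ -1 := by omega
          rw [if_neg this]
          omega
        have hstep : stepC s (acc, (q : Int)) (c :: tw) =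
            (acc ++ [((p : Int), ((p + (c :: tw).length : Nat) : Int))],
              ((p + (c :: tw).length : Nat) : Int)) := by
          simp [stepC, hff]
        have hple : p + (c :: tw).length ≤ s.length := by
          have : tw.length ≤ rest.length := by rw [← htw]; simp
          simp only [List.length_cons]
          omega
        have hr2 : s.drop (p + (c :: tw).length) = r := by
          rw [← List.drop_drop (i := (c :: tw).length) (j := p), hdrop]
          simp only [List.length_cons, List.drop_succ_cons]
          rw [← htw, List.drop_left]
        have hrec := ih (p + (c :: tw).length) (p + (c :: tw).length) (by omega) hple
          (by simp only [List.length_cons]; omega)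
          (by intro k h1 h2 hk; omega)
          (acc ++ [((p : Int), ((p + (c :: tw).length : Nat) : Int))])
        rw [hr2] at hrec
        rw [List.foldl_cons, hstep, hrec]
        have hspec : specB (c :: rest) p = ((p : Int), ((p + (c :: tw).length : Nat) : Int)) ::
            specB r (p + (c :: tw).length) := by
          show (if PySem.Chars.isspace c then specB rest (p + 1)
            else inWord rest (p + 1) (p : Int)) = _
          rw [if_neg hsp, inWord_eq rest (p + 1) (p : Int), ← htwdef, ← hrdef]
          have : p + 1 + tw.length = p + (c :: tw).length := by simp; omega
          rw [this]
        rw [hspec]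
        simp

-- B's loop finished with the trailing append computes specB / inWord
def postB (r : List (Int × Int) × Option Int) (L : Nat) : List (Int × Int) :=
  match r.2 with
  | some st => r.1 ++ [(st, (L : Int))]
  | none => r.1

lemma altGo_spec : ∀ (s : List Char) (i : Nat) (acc : List (Int × Int)),
    postB (altGo s i acc none) (i + s.length) = acc ++ specB s i
    ∧ ∀ st : Int, postB (altGo s i acc (some st)) (i + s.length) = acc ++ inWord s i st := by
  intro s
  induction s with
  | nil =>
    intro i acc
    constructor
    · simp [altGo, postB, specB]
    · intro st; simp [altGo, postB, inWord]
  | cons c rest ih =>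
    intro i acc
    have hL : i + (c :: rest).length = (i + 1) + rest.length := by simp; omega
    by_cases h : PySem.Chars.isspace c
    · constructor
      · rw [show altGo (c :: rest) i acc none = altGo rest (i + 1) acc none by simp [altGo, h],
          hL, (ih (i + 1) acc).1]
        show _ = acc ++ (if PySem.Chars.isspace c then specB rest (i + 1) else _)
        rw [if_pos h]
      · intro st
        rw [show altGo (c :: rest) i acc (some st)
            = altGo rest (i + 1) (acc ++ [(st, (i : Int))]) none by simp [altGo, h],
          hL, (ih (i + 1) (acc ++ [(st, (i : Int))])).1]
        show _ = acc ++ (if PySem.Chars.isspace c then ((st, (i : Int)) :: specB rest (i + 1)) else _)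
        rw [if_pos h]
        simp
    · constructor
      · rw [show altGo (c :: rest) i acc none
            = altGo rest (i + 1) acc (some (i : Int)) by simp [altGo, h],
          hL, ((ih (i + 1) acc).2 (i : Int))]
        show _ = acc ++ (if PySem.Chars.isspace c then _ else inWord rest (i + 1) (i : Int))
        rw [if_neg h]
      · intro st
        rw [show altGo (c :: rest) i acc (some st)
            = altGo rest (i + 1) acc (some st) by simp [altGo, h],
          hL, ((ih (i + 1) acc).2 st)]
        show _ = acc ++ (if PySem.Chars.isspace c then _ else inWord rest (i + 1) st)
        rw [if_neg h]

theorem helper_equiv (text : String) :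
    get_word_boundaries text = get_word_boundaries_alt text := by
  have hA : get_word_boundaries text = specB text.toList 0 := by
    have h0 : get_word_boundaries text
        = (List.foldl (fun (st : List (Int × Int) × Int) (w : String) =>
            stepC text.toList st w.toList) ([], (0 : Int)) (PySem.Str.split₀ text)).1 := rfl
    rw [h0, ← List.foldl_map, PySem.Str.split₀_map_toList]
    have := foldA text.toList text.toList.length 0 0 (by omega) (by omega) (by omega)
      (by intro k h1 h2 hk; omega) []
    simpa using this
  have hB : get_word_boundaries_alt text = specB text.toList 0 := by
    have h0 : get_word_boundaries_alt text
        = postB (altGo text.toList 0 [] none) text.toList.length := rfl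
    rw [h0]
    have := (altGo_spec text.toList 0 []).1
    simpa using this
  rw [hA, hB]

-- ===== VERDICT (by name: the statement is the Claim_ definition above) =====
theorem get_word_boundaries_spec : Claim_equal_get_word_boundaries := by
  intro text _
  exact helper_equiv text
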